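/- GENERATED by mk_final_copies.py from the proof of the farm's unit `imdct_step3_inner_s_loop.2` (farm:imdct_step3_inner_s_loop.2.2: Proof.lean) as the
   re-elaboration sweep compiled it — do not edit. -/
/-
  Unit imdct_step3_inner_s_loop.2, part 2 of 2: float pairs 3 and 4 (with the loop's step), the whole body, the statement.
  Vocabulary (`AtPair`, `LoopIn`, `PtrsIf`, `AtHeadIf`), the pure lemmas and pairs 1 and 2: Lemmas.lean.
-/
import Asan.CheckWalk
import Vorbis.Spec.Units.imdct_step3_inner_s_loop_2
import Vorbis.Spec.Worked.imdct_step3_inner_s_loop_2_Lemmas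
open X86 X86.User Asan Vorbis Vorbis.Spec

set_option maxRecDepth 4000
set_option maxHeartbeats 40000000

namespace Vorbis.Spec.imdct_step3_inner_s_loop_2

/-- **Float pair 3 of the body** (0x10615d … 0x1061ff, C lines 2562-2567: `ee0[-4]`, `ee0[-5]`, `ee2[-4]`, `ee2[-5]` read with four
`load4` checks, combined with two twiddle factors and stored back): from the assertion at its first instruction to the assertion
at the first instruction of the next pair. -/
theorem pair3_ok (Lay : Layout) (hLay : Lay.hi = 0x1000000) (μ : Microarch) (hμ : UserX.MicroOK μ) (u₀ : State)
    (hcode : HasCodeNat Lay u₀ Vorbis.L.imdct_step3_inner_s_loop.entry Vorbis.Code.code_imdct_step3_inner_s_loop.nat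
      Vorbis.L.imdct_step3_inner_s_loop.size)
    (hload4 : Asan.SmallCheck Lay μ Vorbis.WayInv (Vorbis.CodeOK u₀) [.rax, .rcx, .rdx] 4 Vorbis.L.__asan_load4_noabort.entry)
    (others : List Obj) (frames : List (Nat × FrameLayout)) (len i0 koff k0 aoff : Nat) (ue : State) (ret : Word) (s : Nat)
    (v : State)
    (hv : AtPair pair3 u₀ others frames len i0 koff k0 aoff ue ret s v) :
    ReachVia Lay μ WayInv v (fun w => AtPair pair4 u₀ others frames len i0 koff k0 aoff ue ret s w) := by
  -- 1. the assertion's fields; the entry state's facts (`he_room`, `he_top`, `he_stack` … are about `ue`)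
  obtain ⟨hrip, hloop, hlt⟩ := hv
  obtain ⟨hbody, hle, hcnt, hk0reg, hee0, hee2⟩ := hloop
  obtain ⟨he, hpre, hcodeok, habi, hframe, hsame, hshadow⟩ := hbody
  obtain ⟨hrsp, sret, s15, s14, s13, s12, sbp, sbx⟩ := hframe
  have he0 := he
  have hpre0 := hpre
  v_entry he
  obtain ⟨hsh, hn31, hi0, hneg, haoff, haoff29, hk0slot, hk031, hstride, hlive, hA⟩ := hpre
  -- 2. the present state under the walker's names
  have hdf := habi.1
  have hmx := habi.2
  have hsse : SseOK v := sseOK_of_abiInv habi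
  have w_eq : Mem.EqOn Vorbis.L.textLo Vorbis.L.textHi u₀.mem v.mem := hcodeok
  have w_rip := hrip
  have w_rsp := hrsp
  -- the footprint so far and the untouched shadow, in the forms `u_same` / `v_untouched` find
  have hshadow' := hshadow
  unfold Asan.ShadowUntouched at hshadow'
  have hsame' := hsame
  simp only [X86.User.Spec.footprint, vspec] at hsame'
  -- 3. the arithmetic of the two groups of iteration `s`: inside the live buffer `e[0 .. len)`; the products are atoms
  have hg0 := hstride.ee0 hlt (Nat.le_refl 7)
  have hg2 := hstride.ee2 hlt (Nat.le_refl 7)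
  have hhi := hstride.hi
  have hlo := hstride.lo
  rw [arg32_def] at hlo
  have hwhere := hlive.where_ hsh.inv hsh.offText (by omega) (by omega)
  have hksn : k0 * s ≤ k0 * ((ue.reg .rdi).toNat % 2 ^ 32 - 1) := by
    rw [arg32_def] at hlt
    exact Nat.mul_le_mul_left k0 (by omega)
  have hee0' := hee0
  have hee2' := hee2
  obtain ⟨ks, hks⟩ : ∃ ks, k0 * s = ks := ⟨_, rfl⟩
  obtain ⟨kn, hkn⟩ : ∃ kn, k0 * ((ue.reg .rdi).toNat % 2 ^ 32 - 1) = kn := ⟨_, rfl⟩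
  rw [hks] at hg0 hg2 hee0' hee2' hksn
  rw [hkn] at hksn hlo hsame'
  -- 4. the walk: four checks (C lines 2562-2567), stopping after each (at its `ret<k>` label)
  u_walk hcode [hμ.vendor] until [Vorbis.L.imdct_step3_inner_s_loop.ret17, pair4]
    span [Vorbis.L.textLo, Vorbis.L.textHi] side (v_side)
  case check_106161 =>
    -- the load of ee0[-4]: inside the live buffer, and no store so far went to the shadow
    have hun : ShadowUntouched ue.mem s_106161.mem := by v_untouched
    exact hlive.accSmall hsh.inv hun _ 4 (by decide) (by u_omega) (by u_omega)
  -- (the check's `w_zmm : s.zmm = …` would switch the tracking of the vector registers on: the term doubles per SSE step)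
  try clear w_zmm
  u_walk hcode [hμ.vendor] until [Vorbis.L.imdct_step3_inner_s_loop.ret18, pair4]
    span [Vorbis.L.textLo, Vorbis.L.textHi] side (v_side)
  case check_10616e =>
    -- the load of ee2[-4]: inside the live buffer, and no store so far went to the shadow
    have hun : ShadowUntouched ue.mem s_10616e.mem := by v_untouched
    exact hlive.accSmall hsh.inv hun _ 4 (by decide) (by u_omega) (by u_omega)
  -- (the check's `w_zmm : s.zmm = …` would switch the tracking of the vector registers on: the term doubles per SSE step)
  try clear w_zmm
  u_walk hcode [hμ.vendor] until [Vorbis.L.imdct_step3_inner_s_loop.ret19, pair4]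
    span [Vorbis.L.textLo, Vorbis.L.textHi] side (v_side)
  case check_106190 =>
    -- the load of ee0[-5]: inside the live buffer, and no store so far went to the shadow
    have hun : ShadowUntouched ue.mem s_106190.mem := by v_untouched
    exact hlive.accSmall hsh.inv hun _ 4 (by decide) (by u_omega) (by u_omega)
  -- (the check's `w_zmm : s.zmm = …` would switch the tracking of the vector registers on: the term doubles per SSE step)
  try clear w_zmm
  u_walk hcode [hμ.vendor] until [Vorbis.L.imdct_step3_inner_s_loop.ret20, pair4]
    span [Vorbis.L.textLo, Vorbis.L.textHi] side (v_side)
  case check_10619d =>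
    -- the load of ee2[-5]: inside the live buffer, and no store so far went to the shadow
    have hun : ShadowUntouched ue.mem s_10619d.mem := by v_untouched
    exact hlive.accSmall hsh.inv hun _ 4 (by decide) (by u_omega) (by u_omega)
  -- (the check's `w_zmm : s.zmm = …` would switch the tracking of the vector registers on: the term doubles per SSE step)
  try clear w_zmm
  u_walk hcode [hμ.vendor] until [pair4]
    span [Vorbis.L.textLo, Vorbis.L.textHi] side (v_side)
  -- 5. the exit assertion: the loop invariant again (nothing it speaks of moved), the frame and the footprint through the stores
  refine ReachVia.done ⟨w_rip, ⟨⟨he0, hpre0, w_eq, ?abi, ⟨w_rsp, ?_, ?_, ?_, ?_, ?_, ?_, ?_⟩, ?same, ?shadow⟩, hle, ?cnt, ?k0reg,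
    ?ee0, ?ee2⟩, hlt⟩
  case abi => v_inv
  case same =>
    simp only [X86.User.Spec.footprint, vspec]
    rw [hkn]
    u_same
  case shadow => v_untouched
  case cnt =>
    rw [w_kept .r13 rfl]
    exact hcnt
  case k0reg =>
    rw [w_kept .r15 rfl]
    exact hk0reg
  case ee0 =>
    rw [w_kept .rbp rfl]
    exact hee0
  case ee2 =>
    rw [w_kept .rbx rfl]
    exact hee2
  · u_frame sret
  · u_frame s15
  · u_frame s14
  · u_frame s13
  · u_frame s12
  · u_frame sbp
  · u_frame sbx

/-- **Float pair 4 of the body and the loop's step** (0x106204 … 0x1062b8, C lines 2569-2577, 2547: `ee0[-6]`, `ee0[-7]`, `ee2[-6]`,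
`ee2[-7]` with four `load4` checks; `ee0 -= k0 ; ee2 -= k0 ; --i`): from the assertion at `pair4` to the loop head with `s + 1`
iterations done, in the form `AtHeadIf`: the pointer equations of `Loop` hold IF the lower pointer did not wrap below 0. -/
theorem pair4_ok (Lay : Layout) (hLay : Lay.hi = 0x1000000) (μ : Microarch) (hμ : UserX.MicroOK μ) (u₀ : State)
    (hcode : HasCodeNat Lay u₀ Vorbis.L.imdct_step3_inner_s_loop.entry Vorbis.Code.code_imdct_step3_inner_s_loop.nat
      Vorbis.L.imdct_step3_inner_s_loop.size)
    (hload4 : Asan.SmallCheck Lay μ Vorbis.WayInv (Vorbis.CodeOK u₀) [.rax, .rcx, .rdx] 4 Vorbis.L.__asan_load4_noabort.entry)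
    (others : List Obj) (frames : List (Nat × FrameLayout)) (len i0 koff k0 aoff : Nat) (ue : State) (ret : Word) (s : Nat)
    (v : State)
    (hv : AtPair pair4 u₀ others frames len i0 koff k0 aoff ue ret s v) :
    ReachVia Lay μ WayInv v (fun w => AtHeadIf u₀ others frames len i0 koff k0 aoff ue ret (s + 1) w) := by
  -- 1. the assertion's fields; the entry state's facts (`he_room`, `he_top`, `he_stack` … are about `ue`)
  obtain ⟨hrip, hloop, hlt⟩ := hv
  obtain ⟨hbody, hle, hcnt, hk0reg, hee0, hee2⟩ := hloop
  obtain ⟨he, hpre, hcodeok, habi, hframe, hsame, hshadow⟩ := hbody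
  obtain ⟨hrsp, sret, s15, s14, s13, s12, sbp, sbx⟩ := hframe
  have he0 := he
  have hpre0 := hpre
  v_entry he
  obtain ⟨hsh, hn31, hi0, hneg, haoff, haoff29, hk0slot, hk031, hstride, hlive, hA⟩ := hpre
  -- 2. the present state under the walker's names
  have hdf := habi.1
  have hmx := habi.2
  have hsse : SseOK v := sseOK_of_abiInv habi
  have w_eq : Mem.EqOn Vorbis.L.textLo Vorbis.L.textHi u₀.mem v.mem := hcodeok
  have w_rip := hrip
  have w_rsp := hrsp
  -- the footprint so far and the untouched shadow, in the forms `u_same` / `v_untouched` find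
  have hshadow' := hshadow
  unfold Asan.ShadowUntouched at hshadow'
  have hsame' := hsame
  simp only [X86.User.Spec.footprint, vspec] at hsame'
  -- 3. the arithmetic of the two groups of iteration `s`: inside the live buffer `e[0 .. len)`; the products are atoms
  have hg0 := hstride.ee0 hlt (Nat.le_refl 7)
  have hg2 := hstride.ee2 hlt (Nat.le_refl 7)
  have hhi := hstride.hi
  have hlo := hstride.lo
  rw [arg32_def] at hlo
  have hwhere := hlive.where_ hsh.inv hsh.offText (by omega) (by omega)
  have hksn : k0 * s ≤ k0 * ((ue.reg .rdi).toNat % 2 ^ 32 - 1) := by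
    rw [arg32_def] at hlt
    exact Nat.mul_le_mul_left k0 (by omega)
  have hee0' := hee0
  have hee2' := hee2
  obtain ⟨ks, hks⟩ : ∃ ks, k0 * s = ks := ⟨_, rfl⟩
  obtain ⟨kn, hkn⟩ : ∃ kn, k0 * ((ue.reg .rdi).toNat % 2 ^ 32 - 1) = kn := ⟨_, rfl⟩
  rw [hks] at hg0 hg2 hee0' hee2' hksn
  rw [hkn] at hksn hlo hsame'
  -- 4. the walk: four checks (C lines 2569-2577, 2547), stopping after each (at its `ret<k>` label)
  u_walk hcode [hμ.vendor] until [Vorbis.L.imdct_step3_inner_s_loop.ret21, Vorbis.L.imdct_step3_inner_s_loop.loop1]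
    span [Vorbis.L.textLo, Vorbis.L.textHi] side (v_side)
  case check_106208 =>
    -- the load of ee0[-6]: inside the live buffer, and no store so far went to the shadow
    have hun : ShadowUntouched ue.mem s_106208.mem := by v_untouched
    exact hlive.accSmall hsh.inv hun _ 4 (by decide) (by u_omega) (by u_omega)
  -- (the check's `w_zmm : s.zmm = …` would switch the tracking of the vector registers on: the term doubles per SSE step)
  try clear w_zmm
  u_walk hcode [hμ.vendor] until [Vorbis.L.imdct_step3_inner_s_loop.ret22, Vorbis.L.imdct_step3_inner_s_loop.loop1]
    span [Vorbis.L.textLo, Vorbis.L.textHi] side (v_side)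
  case check_106215 =>
    -- the load of ee2[-6]: inside the live buffer, and no store so far went to the shadow
    have hun : ShadowUntouched ue.mem s_106215.mem := by v_untouched
    exact hlive.accSmall hsh.inv hun _ 4 (by decide) (by u_omega) (by u_omega)
  -- (the check's `w_zmm : s.zmm = …` would switch the tracking of the vector registers on: the term doubles per SSE step)
  try clear w_zmm
  u_walk hcode [hμ.vendor] until [Vorbis.L.imdct_step3_inner_s_loop.ret23, Vorbis.L.imdct_step3_inner_s_loop.loop1]
    span [Vorbis.L.textLo, Vorbis.L.textHi] side (v_side)
  case check_106237 =>
    -- the load of ee0[-7]: inside the live buffer, and no store so far went to the shadow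
    have hun : ShadowUntouched ue.mem s_106237.mem := by v_untouched
    exact hlive.accSmall hsh.inv hun _ 4 (by decide) (by u_omega) (by u_omega)
  -- (the check's `w_zmm : s.zmm = …` would switch the tracking of the vector registers on: the term doubles per SSE step)
  try clear w_zmm
  u_walk hcode [hμ.vendor] until [Vorbis.L.imdct_step3_inner_s_loop.ret24, Vorbis.L.imdct_step3_inner_s_loop.loop1]
    span [Vorbis.L.textLo, Vorbis.L.textHi] side (v_side)
  case check_106244 =>
    -- the load of ee2[-7]: inside the live buffer, and no store so far went to the shadow
    have hun : ShadowUntouched ue.mem s_106244.mem := by v_untouched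
    exact hlive.accSmall hsh.inv hun _ 4 (by decide) (by u_omega) (by u_omega)
  -- (the check's `w_zmm : s.zmm = …` would switch the tracking of the vector registers on: the term doubles per SSE step)
  try clear w_zmm
  u_walk hcode [hμ.vendor] until [Vorbis.L.imdct_step3_inner_s_loop.loop1]
    span [Vorbis.L.textLo, Vorbis.L.textHi] side (v_side)
  -- 5. the exit assertion: the counter and the two pointers as numbers FIRST (`movsxd rax, r15d ; shl rax, 2 ; sub rbp, rax ;
  -- sub rbx, rax ; sub r13d, 1`), then the walker's facts with `signExtend` / `<<<` leave the context (`u_omega` fails with them there)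
  have hcnt' : (s_1062b8.reg .r13).toNat = arg32 ue .rdi - (s + 1) := by
    rw [w_r13, dec32 _ (by omega) (by omega), hcnt]
    omega
  have hptrs : PtrsIf i0 koff k0 ue (s + 1) s_1062b8 := by
    intro hnw
    have hmul : k0 * (s + 1) = k0 * s + k0 := Nat.mul_succ k0 s
    have hax : (Word.ofBV (BitVec.signExtend 64 (Word.part .w32 (v.reg .r15)))).toNat = k0 := by
      rw [sext_of_lt _ (by omega), hk0reg]
    refine ⟨?_, ?_⟩
    · -- `rbp − 4 k0`: not below 0 by `hnw`
      rw [w_rbp, sub_shl2 _ _ k0 hax (by omega), hmul]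
      omega
    · rw [w_rbx, sub_shl2 _ _ k0 hax (by omega), hmul]
      omega
  clear w_rbp w_rbx w_rax w_r13
  -- the frame and the footprint through the stores
  refine ReachVia.done ⟨w_rip, ⟨he0, hpre0, w_eq, ?abi, ⟨w_rsp, ?_, ?_, ?_, ?_, ?_, ?_, ?_⟩, ?same, ?shadow⟩, ?le, hcnt', ?k0reg,
    hptrs⟩
  case abi => v_inv
  case same =>
    simp only [X86.User.Spec.footprint, vspec]
    rw [hkn]
    u_same
  case shadow => v_untouched
  case le => omega
  case k0reg =>
    rw [w_kept .r15 rfl]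
    exact hk0reg
  · u_frame sret
  · u_frame s15
  · u_frame s14
  · u_frame s13
  · u_frame s12
  · u_frame sbp
  · u_frame sbx

/-- **The whole body** (0x106010 … 0x1062b8): the four pairs in sequence, from the segment's entry assertion `AtBody` to `AtHeadIf`
with `s + 1`. No machine code is walked here. -/
theorem body_ok (Lay : Layout) (hLay : Lay.hi = 0x1000000) (μ : Microarch) (hμ : UserX.MicroOK μ) (u₀ : State)
    (hcode : HasCodeNat Lay u₀ Vorbis.L.imdct_step3_inner_s_loop.entry Vorbis.Code.code_imdct_step3_inner_s_loop.nat
      Vorbis.L.imdct_step3_inner_s_loop.size)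
    (hload4 : Asan.SmallCheck Lay μ Vorbis.WayInv (Vorbis.CodeOK u₀) [.rax, .rcx, .rdx] 4 Vorbis.L.__asan_load4_noabort.entry)
    (others : List Obj) (frames : List (Nat × FrameLayout)) (len i0 koff k0 aoff : Nat) (ue : State) (ret : Word) (s : Nat)
    (v : State)
    (hv : imdct_step3_inner_s_loop.AtBody u₀ others frames len i0 koff k0 aoff ue ret s v) :
    ReachVia Lay μ WayInv v (fun w => AtHeadIf u₀ others frames len i0 koff k0 aoff ue ret (s + 1) w) := by
  have h1 := pair1_ok Lay hLay μ hμ u₀ hcode hload4 others frames len i0 koff k0 aoff ue ret s v (atPair_of_atBody hv)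
  apply h1.trans
  intro w2 hw2
  apply (pair2_ok Lay hLay μ hμ u₀ hcode hload4 others frames len i0 koff k0 aoff ue ret s w2 hw2).trans
  intro w3 hw3
  apply (pair3_ok Lay hLay μ hμ u₀ hcode hload4 others frames len i0 koff k0 aoff ue ret s w3 hw3).trans
  intro w4 hw4
  exact pair4_ok Lay hLay μ hμ u₀ hcode hload4 others frames len i0 koff k0 aoff ue ret s w4 hw4


end Vorbis.Spec.imdct_step3_inner_s_loop_2

open Vorbis.Spec.imdct_step3_inner_s_loop_2

/-- Segment 2 of `imdct_step3_inner_s_loop` (the loop body 0x106010 … 0x1062b8, C lines 2547–2577: eight float pairs' worth of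
butterflies in four groups, 16 `load4` checks, `ee0 -= k0 ; ee2 -= k0 ; --i`): from `AtBody` after `s` iterations to the loop head
`AtHead` with `s + 1`. The body (`body_ok`) reaches `AtHeadIf`; the guarded pointer fields of `Loop` follow from it when another
iteration is to come (`atHead_of_headIf`). -/
theorem Vorbis.Spec.Worked.imdct_step3_inner_s_loop_2_ok : Vorbis.Spec.imdct_step3_inner_s_loop_2.Statement := by
  intro Lay hLay μ hμ u₀ hcode hload4 others frames len i0 koff k0 aoff ue ret s v hv
  apply (body_ok Lay hLay μ hμ u₀ hcode hload4 others frames len i0 koff k0 aoff ue ret s v hv).trans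
  intro w hw
  exact ReachVia.done (atHead_of_headIf hw)
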